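-- pv_equiv track=rewrite | github.com/arnauuuuud/europed_suite | europed_analysis.py | remove_wrong_slope
-- ===== SOURCE A (Python) =====
-- from collections import OrderedDict
--
-- def reverse_nested_dict(d):
--     reversed_dict = {}
--     for first_level_key, second_level_dict in d.items():
--         for second_level_key, value in second_level_dict.items():
--             if second_level_key not in reversed_dict:
--                 reversed_dict[second_level_key] = {}
--             reversed_dict[second_level_key][first_level_key] = value
--     res = OrderedDict(sorted(reversed_dict.items()))
--     return res
--
-- def remove_wrong_slope(dict_gamma):
--     dict_gamma_r = reverse_nested_dict(dict_gamma)
--     for n in dict_gamma_r.keys():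
--         dict_gamma_mode = dict_gamma_r[n]
--         list_items = list(dict_gamma_mode.items())
--         list_items = sorted(list_items, key=lambda x: x[0])
--         for i in range(len(list_items)-1):
--             if list_items[i+1][1] < list_items[i][1]:
--                 del dict_gamma_mode[list_items[i][0]]
--     dict_gamma = reverse_nested_dict(dict_gamma_r)
--     return dict_gamma
-- ===== SOURCE B (Python) =====
-- from collections import OrderedDict
--
-- def remove_wrong_slope(dict_gamma):
--     # No transposition and no removal set: decide each entry locally.
--     # An entry (fk, n) is dropped exactly when the nearest larger outer key
--     # fk2 > fk that also carries n has a strictly smaller value.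
--     result = OrderedDict()
--     for fk in sorted(dict_gamma):
--         inner = {}
--         for n in sorted(dict_gamma[fk]):
--             v = dict_gamma[fk][n]
--             best = None
--             for fk2, d2 in dict_gamma.items():
--                 if fk2 > fk and n in d2 and (best is None or fk2 < best[0]):
--                     best = (fk2, d2[n])
--             if best is None or best[1] >= v:
--                 inner[n] = v
--         if inner:
--             result[fk] = inner
--     return result
-- ===== Notes on version B (the rewrite author's own statement) =====
-- stated objective: alternative
-- what changed: A transposes the nested dict, deletes the earlier key of each decreasing adjacent pair per inner group, and transposes back; B never transposes or sorts groups at all: it builds the sorted output directly and decides each entry locally by scanning the dict for the nearest larger outer key carrying the same inner key and comparing values.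
import Mathlib
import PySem

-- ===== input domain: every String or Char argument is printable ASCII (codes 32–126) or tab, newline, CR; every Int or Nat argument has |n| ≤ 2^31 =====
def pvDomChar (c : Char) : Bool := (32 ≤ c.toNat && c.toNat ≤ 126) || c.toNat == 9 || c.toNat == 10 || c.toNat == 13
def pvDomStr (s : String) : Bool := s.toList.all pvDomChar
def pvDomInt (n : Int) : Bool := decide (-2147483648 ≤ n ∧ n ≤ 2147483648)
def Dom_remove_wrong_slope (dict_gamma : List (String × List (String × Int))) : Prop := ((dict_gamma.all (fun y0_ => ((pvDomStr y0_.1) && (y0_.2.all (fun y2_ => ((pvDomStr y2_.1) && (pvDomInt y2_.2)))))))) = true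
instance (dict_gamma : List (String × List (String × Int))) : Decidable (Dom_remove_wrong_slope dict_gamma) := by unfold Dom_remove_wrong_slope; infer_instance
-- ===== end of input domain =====

-- B never transposes the nested dict: it builds the sorted output directly, deciding each entry
-- locally by scanning for the nearest larger outer key carrying the same inner key (objective:
-- alternative algorithm; no removal pass, no double reversal).


-- ===== PORT A =====
-- helper: reverse_nested_dict(d) — double loop building reversed_dict, then OrderedDict(sorted(items));
-- Python sorts (key, dict) tuples: keys are unique, so sorting by the key alone is exact
def pvRevNested (d : PySem.Dict String (PySem.Dict String Int)) : PySem.Dict String (PySem.Dict String Int) :=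
  let rd : PySem.Dict String (PySem.Dict String Int) :=
    d.items.foldl (fun rd p =>
      p.2.items.foldl (fun rd q =>
        let rd1 := if rd.contains q.1 then rd else rd.insert q.1 PySem.Dict.empty
        rd1.modify q.1 PySem.Dict.empty (fun m => m.insert p.1 q.2)) rd)
      PySem.Dict.empty
  PySem.Dict.mk (PySem.List.sorted rd.items (fun p => p.1) false)

-- helper: the body of the per-n loop (sort items, delete keys with a falling next value)
def pvPruneMode (mode : PySem.Dict String Int) : PySem.Dict String Int :=
  let li := PySem.List.sorted mode.items (fun x => x.1) false
  (PySem.List.pyRange 0 (PySem.List.len li - 1) 1).foldl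
    (fun m i =>
      if (PySem.List.pyGetD li (i + 1) ("", 0)).2 < (PySem.List.pyGetD li i ("", 0)).2
      then m.erase (PySem.List.pyGetD li i ("", 0)).1 else m) mode

def remove_wrong_slope (dict_gamma : List (String × List (String × Int))) : List (String × List (String × Int)) :=
  let d : PySem.Dict String (PySem.Dict String Int) :=
    PySem.Dict.mk (dict_gamma.map (fun p => (p.1, PySem.Dict.mk p.2)))
  let r := pvRevNested d
  let r2 := PySem.Dict.mk (r.items.map (fun p => (p.1, pvPruneMode p.2)))
  (pvRevNested r2).items.map (fun p => (p.1, p.2.items))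

-- ===== PORT B =====
-- helper: one step of B's inner scan `for fk2, d2 in dict_gamma.items(): if fk2 > fk and n in d2 and …`
def pvBestStep (fk n : String) (best : Option (String × Int)) (p : String × List (String × Int)) :
    Option (String × Int) :=
  if decide (fk < p.1) && (PySem.Dict.mk p.2).contains n
      && (match best with | none => true | some b => decide (p.1 < b.1))
  then some (p.1, (PySem.Dict.mk p.2).getD n 0) else best

def remove_wrong_slope_alt (dict_gamma : List (String × List (String × Int))) : List (String × List (String × Int)) :=
  let dg := PySem.Dict.mk dict_gamma
  (PySem.List.sorted dg.keys (fun x => x)).foldl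
    (fun res fk =>
      let src := PySem.Dict.mk (dg.getD fk [])
      let inner := (PySem.List.sorted src.keys (fun x => x)).foldl
        (fun acc n =>
          let v := src.getD n 0
          match dict_gamma.foldl (pvBestStep fk n) none with
          | none => acc.insert n v
          | some b => if v ≤ b.2 then acc.insert n v else acc)
        (PySem.Dict.empty : PySem.Dict String Int)
      if inner.size ≠ 0 then res ++ [(fk, inner.items)] else res) []

-- ===== PRECONDITION & SPEC =====
-- Pre_ excludes association lists with duplicate outer or inner keys: A's parameter is a Python
-- dict (of dicts), so such lists do not denote a distinct input of A.
def Pre_remove_wrong_slope (dict_gamma : List (String × List (String × Int))) : Prop :=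
  (dict_gamma.map (fun p => p.1)).Nodup ∧ ∀ p ∈ dict_gamma, (p.2.map (fun q => q.1)).Nodup
instance (dict_gamma : List (String × List (String × Int))) : Decidable (Pre_remove_wrong_slope dict_gamma) := by
  unfold Pre_remove_wrong_slope; infer_instance

def pvWitness_remove_wrong_slope : (List (String × List (String × Int))) :=
  [("a", [("n1", 1), ("n2", 3)]), ("b", [("n1", 2)])]

def Spec_remove_wrong_slope (dict_gamma : List (String × List (String × Int))) (out : List (String × List (String × Int))) : Prop := out = remove_wrong_slope_alt dict_gamma
instance (dict_gamma : List (String × List (String × Int))) (out : List (String × List (String × Int))) : Decidable (Spec_remove_wrong_slope dict_gamma out) := by unfold Spec_remove_wrong_slope; infer_instance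

-- ===== CLAIM (what is proved, stated in full; the proofs are below) =====
def Claim_equal_remove_wrong_slope : Prop := ∀ (dict_gamma : List (String × List (String × Int))), Dom_remove_wrong_slope dict_gamma → Pre_remove_wrong_slope dict_gamma → Spec_remove_wrong_slope dict_gamma (remove_wrong_slope dict_gamma)

-- ===== LEMMAS AND PROOFS =====

theorem pv_nat_adjacent {α β : Type} (L : List α) (d : α)
    (f : β → α → α → β) (init : β) :
    (List.range (L.length - 1)).foldl (fun acc k => f acc (L.getD k d) (L.getD (k+1) d)) init
    = (L.zip L.tail).foldl (fun acc pr => f acc pr.1 pr.2) init := by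
  induction L generalizing init with
  | nil => simp
  | cons x xs ih =>
    cases xs with
    | nil => simp
    | cons y ys =>
      simp only [List.length_cons, Nat.add_sub_cancel, List.range_succ_eq_map,
        List.foldl_cons, List.foldl_map, List.zip_cons_cons, List.tail_cons,
        List.getD_cons_succ, List.getD_cons_zero]
      exact ih (f init x y)

theorem pv_foldl_range_adjacent {α β : Type} (L : List α) (d : α)
    (f : β → α → α → β) (init : β) :
    (PySem.List.pyRange 0 (PySem.List.len L - 1) 1).foldl
      (fun acc i => f acc (PySem.List.pyGetD L i d) (PySem.List.pyGetD L (i + 1) d)) init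
    = (L.zip L.tail).foldl (fun acc pr => f acc pr.1 pr.2) init := by
  rw [PySem.List.pyRange_one]
  have hcast : ((PySem.List.len L) - 1 - 0).toNat = L.length - 1 := by
    simp only [PySem.List.len_eq, sub_zero]; omega
  rw [hcast, ← pv_nat_adjacent L d f init, List.foldl_map]
  apply PySem.List.foldl_congr_mem
  intro acc k hk
  rw [zero_add, show ((k:Int) + 1) = ((k+1 : Nat) : Int) from by push_cast; ring,
    PySem.List.pyGetD_natCast, PySem.List.pyGetD_natCast]

-- keys deleted by the slope scan over a sorted item list
def pvDrops (li : List (String × Int)) : List String :=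
  ((li.zip li.tail).filter (fun pr => decide (pr.2.2 < pr.1.2))).map (fun pr => pr.1.1)

theorem pv_foldl_erase_items (ks : List String) (m : PySem.Dict String Int) :
    (ks.foldl PySem.Dict.erase m).items
    = m.items.filter (fun p => !(ks.contains p.1)) := by
  induction ks generalizing m with
  | nil => simp
  | cons k ks ih =>
    simp only [List.foldl_cons, ih, PySem.Dict.erase, List.filter_filter]
    apply List.filter_congr
    intro p _
    simp only [List.contains_cons]
    cases h : p.1 == k <;> simp

theorem pv_prune_eq (m : PySem.Dict String Int) :
    pvPruneMode m
    = PySem.Dict.mk (m.items.filter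
        (fun p => !((pvDrops (PySem.List.sorted m.items (fun x => x.1))).contains p.1))) := by
  unfold pvPruneMode
  rw [pv_foldl_range_adjacent (f := fun (m : PySem.Dict String Int) (a b : String × Int) =>
      if b.2 < a.2 then m.erase a.1 else m)]
  rw [PySem.List.foldl_ite_eq_foldl_filter
      (p := fun pr : (String × Int) × (String × Int) => pr.2.2 < pr.1.2)]
  rw [← List.foldl_map (f := fun pr : (String × Int) × (String × Int) => pr.1.1)
      (g := PySem.Dict.erase)]
  apply PySem.Dict.ext
  rw [pv_foldl_erase_items]
  rfl

-- proof-only canonical forms of A's two grouping loops, over the flattened triple list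
def pvStepA (d : PySem.Dict String (PySem.Dict String Int)) (t : String × String × Int) :
    PySem.Dict String (PySem.Dict String Int) :=
  let d1 := if d.contains t.2.1 then d else d.insert t.2.1 PySem.Dict.empty
  d1.modify t.2.1 PySem.Dict.empty (fun m => m.insert t.1 t.2.2)

def pvStepB (d : PySem.Dict String (List (String × Int))) (t : String × String × Int) :
    PySem.Dict String (List (String × Int)) :=
  d.modify t.2.1 [] (fun l => l ++ [(t.1, t.2.2)])

theorem pv_sim (T : List (String × String × Int))
    (dA : PySem.Dict String (PySem.Dict String Int)) (dB : PySem.Dict String (List (String × Int)))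
    (hpair : (T.map (fun t => (t.1, t.2.1))).Nodup)
    (hk : dA.keys = dB.keys)
    (hv : ∀ n, (dA.getD n PySem.Dict.empty).items = dB.getD n [])
    (hfresh : ∀ t ∈ T, t.1 ∉ (dB.getD t.2.1 []).map (fun r => r.1)) :
    (T.foldl pvStepA dA).keys = (T.foldl pvStepB dB).keys ∧
    ∀ n, ((T.foldl pvStepA dA).getD n PySem.Dict.empty).items
          = (T.foldl pvStepB dB).getD n [] := by
  induction T generalizing dA dB with
  | nil => exact ⟨hk, hv⟩
  | cons t T ih =>
    obtain ⟨fk, n, v⟩ := t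
    simp only [List.foldl_cons]
    have hmode : (dA.getD n PySem.Dict.empty).items = dB.getD n [] := hv n
    have hfk : fk ∉ (dB.getD n []).map (fun r => r.1) := hfresh _ (List.mem_cons_self ..)
    have hmc : (dA.getD n PySem.Dict.empty).contains fk = false := by
      rw [← Bool.not_eq_true, PySem.Dict.contains_iff_mem_keys]
      show fk ∉ (dA.getD n PySem.Dict.empty).items.map (fun r => r.1)
      rw [hmode]; exact hfk
    have hcontains : dA.contains n = dB.contains n := by
      rw [PySem.Dict.contains_eq_decide_mem_keys, PySem.Dict.contains_eq_decide_mem_keys, hk]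
    have hk' : (pvStepA dA (fk, n, v)).keys = (pvStepB dB (fk, n, v)).keys := by
      unfold pvStepA pvStepB PySem.Dict.modify
      by_cases hc : dB.contains n = true
      · rw [if_pos (hcontains ▸ hc)]
        rw [PySem.Dict.keys_insert_of_contains _ _ (hcontains ▸ hc),
            PySem.Dict.keys_insert_of_contains _ _ hc, hk]
      · have hcB : dB.contains n = false := by simpa using hc
        have hc' : dA.contains n = false := by rw [hcontains]; exact hcB
        rw [if_neg (by simp [hc'])]
        rw [PySem.Dict.keys_insert_of_contains _ _ (PySem.Dict.contains_insert_self _ _ _),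
            PySem.Dict.keys_insert_of_not_contains _ _ hc',
            PySem.Dict.keys_insert_of_not_contains _ _ hcB, hk]
    have hgA : ∀ n', (pvStepA dA (fk, n, v)).getD n' PySem.Dict.empty
        = if n' = n then (dA.getD n PySem.Dict.empty).insert fk v
          else dA.getD n' PySem.Dict.empty := by
      intro n'
      unfold pvStepA PySem.Dict.modify
      by_cases hn' : n' = n
      · subst hn'
        rw [if_pos rfl, PySem.Dict.getD_insert_self]
        by_cases hc : dA.contains n' = true
        · rw [if_pos hc]
        · rw [if_neg (by simpa using hc), PySem.Dict.getD_insert_self,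
              PySem.Dict.getD_of_not_contains _ _ (by simpa using hc)]
      · rw [if_neg hn', PySem.Dict.getD_insert_of_ne _ _ _ hn']
        by_cases hc : dA.contains n = true
        · rw [if_pos hc]
        · rw [if_neg (by simpa using hc), PySem.Dict.getD_insert_of_ne _ _ _ hn']
    have hgB : ∀ n', (pvStepB dB (fk, n, v)).getD n' []
        = if n' = n then dB.getD n [] ++ [(fk, v)] else dB.getD n' [] := by
      intro n'
      unfold pvStepB
      by_cases hn' : n' = n
      · subst hn'; rw [if_pos rfl, PySem.Dict.getD_modify_self]
      · rw [if_neg hn', PySem.Dict.getD_modify_of_ne _ _ _ hn']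
    have hv' : ∀ n', ((pvStepA dA (fk, n, v)).getD n' PySem.Dict.empty).items
        = (pvStepB dB (fk, n, v)).getD n' [] := by
      intro n'
      rw [hgA, hgB]
      by_cases hn' : n' = n
      · rw [if_pos hn', if_pos hn']
        rw [PySem.Dict.items_insert_of_not_contains _ _ hmc, hmode]
      · rw [if_neg hn', if_neg hn']; exact hv n'
    refine ih _ _ ?_ hk' hv' ?_
    · exact (List.nodup_cons.mp hpair).2
    · intro t' ht'
      rw [hgB]
      by_cases hn' : t'.2.1 = n
      · rw [if_pos hn']
        simp only [List.map_append, List.map_cons, List.map_nil, List.mem_append,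
          List.mem_singleton]
        rintro (h | h)
        · exact hfresh t' (List.mem_cons_of_mem _ ht') (hn' ▸ h)
        · have : (fk, n) ∈ T.map (fun t => (t.1, t.2.1)) := by
            refine List.mem_map.mpr ⟨t', ht', ?_⟩
            rw [h, hn']
          exact (List.nodup_cons.mp hpair).1 this
      · rw [if_neg hn']
        exact hfresh t' (List.mem_cons_of_mem _ ht')

-- flattened triples (fk, n, v) of a nested dict's item list
def pvTri (xs : List (String × PySem.Dict String Int)) : List (String × String × Int) :=
  xs.flatMap (fun p => p.2.items.map (fun q => (p.1, q.1, q.2)))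

-- group of a given inner key n: (fk, v) pairs in traversal order
def pvGrp (T : List (String × String × Int)) (n : String) : List (String × Int) :=
  (T.filter (fun t => t.2.1 == n)).map (fun t => (t.1, t.2.2))

theorem pv_stepB_foldl (T : List (String × String × Int))
    (d : PySem.Dict String (List (String × Int))) :
    T.foldl pvStepB d
    = (T.map (fun t => (t.2.1, (t.1, t.2.2)))).foldl
        (fun d p => d.modify p.1 [] (fun l => l ++ [p.2])) d := by
  rw [List.foldl_map]; rfl

theorem pv_stepB_keys (T : List (String × String × Int)) :
    (T.foldl pvStepB PySem.Dict.empty).keys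
    = PySem.Set.ofList (T.map (fun t => t.2.1)) := by
  exact PySem.Dict.keys_foldl_modify_key T (fun t => t.2.1) ([] : List (String × Int))
      (fun _ t l => l ++ [(t.1, t.2.2)]) PySem.Dict.empty

theorem pv_stepB_getD (T : List (String × String × Int)) (n : String) :
    (T.foldl pvStepB PySem.Dict.empty).getD n [] = pvGrp T n := by
  rw [pv_stepB_foldl, PySem.Dict.getD_foldl_modify_append]
  simp only [PySem.Dict.getD_empty, List.nil_append, List.filter_map, pvGrp, List.map_map]
  rfl

theorem pv_stepB_nodup (T : List (String × String × Int)) :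
    (T.foldl pvStepB PySem.Dict.empty).keys.Nodup :=
  PySem.Dict.nodup_keys_foldl_modify_key T (fun t => t.2.1) ([] : List (String × Int))
    (fun _ t l => l ++ [(t.1, t.2.2)]) PySem.Dict.empty List.nodup_nil

theorem pv_nested_eq (xs : List (String × PySem.Dict String Int)) :
    xs.foldl (fun rd p => p.2.items.foldl (fun rd q =>
        let rd1 := if rd.contains q.1 then rd else rd.insert q.1 PySem.Dict.empty
        rd1.modify q.1 PySem.Dict.empty (fun m => m.insert p.1 q.2)) rd) PySem.Dict.empty
    = (pvTri xs).foldl pvStepA PySem.Dict.empty := by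
  rw [pvTri, List.foldl_flatMap]
  simp only [List.foldl_map]
  rfl

theorem pv_rev_items (xs : List (String × PySem.Dict String Int))
    (hpair : ((pvTri xs).map (fun t => (t.1, t.2.1))).Nodup) :
    (pvRevNested (PySem.Dict.mk xs)).items
    = (PySem.List.sorted (PySem.Set.ofList ((pvTri xs).map (fun t => t.2.1))) (fun x => x)).map
        (fun n => (n, PySem.Dict.mk (pvGrp (pvTri xs) n))) := by
  obtain ⟨hkeys, hget⟩ := pv_sim (pvTri xs) PySem.Dict.empty PySem.Dict.empty hpair rfl
    (fun n => rfl) (by intro t _ h; simp [PySem.Dict.getD_empty] at h)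
  have hrd := pv_nested_eq xs
  have hnodup : ((pvTri xs).foldl pvStepA PySem.Dict.empty).keys.Nodup := by
    rw [hkeys]; exact pv_stepB_nodup (pvTri xs)
  have hitems : ((pvTri xs).foldl pvStepA PySem.Dict.empty).items
      = (PySem.Set.ofList ((pvTri xs).map (fun t => t.2.1))).map
          (fun n => (n, PySem.Dict.mk (pvGrp (pvTri xs) n))) := by
    rw [PySem.Dict.items_eq_map_keys _ hnodup PySem.Dict.empty, hkeys, pv_stepB_keys]
    apply List.map_congr_left
    intro n _
    congr 1
    apply PySem.Dict.ext
    exact (hget n).trans (pv_stepB_getD _ n)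
  show (PySem.List.sorted
      (xs.foldl (fun rd p => p.2.items.foldl (fun rd q =>
        let rd1 := if rd.contains q.1 then rd else rd.insert q.1 PySem.Dict.empty
        rd1.modify q.1 PySem.Dict.empty (fun m => m.insert p.1 q.2)) rd) PySem.Dict.empty).items
      (fun p => p.1) false) = _
  rw [hrd, hitems]
  apply PySem.List.sorted_eq_of_perm_of_pairwise_lt
  · exact (PySem.List.sorted_perm _ _ _).map _
  · rw [List.pairwise_map]
    exact PySem.List.sorted_ofList_pairwise_lt _

-- named pieces of the common canonical form
def pvTriples (dg : List (String × List (String × Int))) : List (String × String × Int) :=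
  dg.flatMap (fun p => p.2.map (fun q => (p.1, q.1, q.2)))

def pvN (dg : List (String × List (String × Int))) : List String :=
  PySem.Set.ofList ((pvTriples dg).map (fun t => t.2.1))

def pvNs (dg : List (String × List (String × Int))) : List String :=
  PySem.List.sorted (pvN dg) (fun x => x)

def pvG (dg : List (String × List (String × Int))) (n : String) : List (String × Int) :=
  pvGrp (pvTriples dg) n

def pvH (dg : List (String × List (String × Int))) (n : String) : List (String × Int) :=
  (pvG dg n).filter (fun p => !((pvDrops (PySem.List.sorted (pvG dg n) (fun x => x.1))).contains p.1))

def pvT2 (dg : List (String × List (String × Int))) : List (String × String × Int) :=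
  (pvNs dg).flatMap (fun n => (pvH dg n).map (fun q => (n, q.1, q.2)))

def pvFKs (dg : List (String × List (String × Int))) : List String :=
  PySem.Set.ofList ((pvT2 dg).map (fun t => t.2.1))

def pvG2 (dg : List (String × List (String × Int))) (fk : String) : List (String × Int) :=
  pvGrp (pvT2 dg) fk

-- Nodup of the (first, second) pairs of a flatMap of tagged lists
theorem pv_nodup_flat {α β : Type} [DecidableEq α] [DecidableEq β]
    (l : List (α × List β)) (hl : (l.map (fun p => p.1)).Nodup)
    (hg : ∀ p ∈ l, p.2.Nodup) :
    (l.flatMap (fun p => p.2.map (fun b => (p.1, b)))).Nodup := by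
  induction l with
  | nil => simp
  | cons p l ih =>
    simp only [List.flatMap_cons, List.nodup_append]
    refine ⟨?_, ih (List.nodup_cons.mp hl).2 (fun q hq => hg q (List.mem_cons_of_mem _ hq)), ?_⟩
    · exact (hg p (List.mem_cons_self ..)).map_on
        (fun x _ y _ h => by simpa using congrArg Prod.snd h)
    · intro z hz w hw hzw
      obtain ⟨b, _, rfl⟩ := List.mem_map.mp hz
      obtain ⟨q, hq, hb⟩ := List.mem_flatMap.mp hw
      obtain ⟨b', _, hb'⟩ := List.mem_map.mp hb
      apply (List.nodup_cons.mp hl).1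
      refine List.mem_map.mpr ⟨q, hq, ?_⟩
      have : w.1 = q.1 := by rw [← hb']
      rw [← this, ← hzw]

theorem pv_triples_pairs_nodup (dg : List (String × List (String × Int)))
    (h1 : (dg.map (fun p => p.1)).Nodup)
    (h2 : ∀ p ∈ dg, (p.2.map (fun q => q.1)).Nodup) :
    ((pvTriples dg).map (fun t => (t.1, t.2.1))).Nodup := by
  have he : (pvTriples dg).map (fun t => (t.1, t.2.1))
      = (dg.map (fun p => (p.1, p.2.map (fun q => q.1)))).flatMap
          (fun p => p.2.map (fun b => (p.1, b))) := by
    simp [pvTriples, List.map_flatMap, List.flatMap_map, List.map_map, Function.comp_def]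
  rw [he]
  apply pv_nodup_flat
  · simpa [List.map_map, Function.comp_def] using h1
  · intro p hp
    obtain ⟨q, hq, rfl⟩ := List.mem_map.mp hp
    exact h2 q hq

-- first components of a group are distinct
theorem pv_grp_fst_nodup (T : List (String × String × Int))
    (hpair : (T.map (fun t => (t.1, t.2.1))).Nodup) (n : String) :
    ((pvGrp T n).map (fun p => p.1)).Nodup := by
  have he : (pvGrp T n).map (fun p => p.1)
      = ((T.filter (fun t => t.2.1 == n)).map (fun t => (t.1, t.2.1))).map (fun p => p.1) := by
    simp [pvGrp, List.map_map]
  rw [he]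
  have hnd : ((T.filter (fun t => t.2.1 == n)).map (fun t => (t.1, t.2.1))).Nodup :=
    hpair.sublist (((T.filter_sublist (p := fun t => t.2.1 == n))).map _)
  refine hnd.map_on ?_
  intro x hx y hy hxy
  obtain ⟨tx, htx, rfl⟩ := List.mem_map.mp hx
  obtain ⟨ty, hty, rfl⟩ := List.mem_map.mp hy
  have hxn : tx.2.1 = n := by simpa using (List.mem_filter.mp htx).2
  have hyn : ty.2.1 = n := by simpa using (List.mem_filter.mp hty).2
  simp only [Prod.ext_iff]
  exact ⟨hxy, hxn.trans hyn.symm⟩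

theorem pv_sorted_nodup {α : Type} [LinearOrder α] [BEq α] [LawfulBEq α] (xs : List α) :
    (PySem.List.sorted (PySem.Set.ofList xs) (fun x => x)).Nodup :=
  ((PySem.List.sorted_perm (PySem.Set.ofList xs) (fun x => x) false).nodup_iff).mpr
    (PySem.Set.nodup_ofList xs)

theorem pvH_fst_nodup (dg : List (String × List (String × Int)))
    (hpair : ((pvTriples dg).map (fun t => (t.1, t.2.1))).Nodup) (n : String) :
    ((pvH dg n).map (fun p => p.1)).Nodup :=
  (pv_grp_fst_nodup _ hpair n).sublist
    ((List.filter_sublist (l := pvG dg n)).map _)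

theorem pvT2_pairs_nodup (dg : List (String × List (String × Int)))
    (hpair : ((pvTriples dg).map (fun t => (t.1, t.2.1))).Nodup) :
    ((pvT2 dg).map (fun t => (t.1, t.2.1))).Nodup := by
  have he : (pvT2 dg).map (fun t => (t.1, t.2.1))
      = ((pvNs dg).map (fun n => (n, (pvH dg n).map (fun p => p.1)))).flatMap
          (fun p => p.2.map (fun b => (p.1, b))) := by
    simp [pvT2, List.map_flatMap, List.flatMap_map, List.map_map, Function.comp_def]
  rw [he]
  apply pv_nodup_flat
  · simpa [List.map_map, Function.comp_def] using pv_sorted_nodup ((pvTriples dg).map (fun t => t.2.1))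
  · intro p hp
    obtain ⟨n, _, rfl⟩ := List.mem_map.mp hp
    exact pvH_fst_nodup dg hpair n

theorem pvA_char (dg : List (String × List (String × Int)))
    (h1 : (dg.map (fun p => p.1)).Nodup)
    (h2 : ∀ p ∈ dg, (p.2.map (fun q => q.1)).Nodup) :
    remove_wrong_slope dg
    = (PySem.List.sorted (pvFKs dg) (fun x => x)).map (fun fk => (fk, pvG2 dg fk)) := by
  have hpair1 := pv_triples_pairs_nodup dg h1 h2
  have hTri1 : pvTri (dg.map (fun p => (p.1, PySem.Dict.mk p.2))) = pvTriples dg := by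
    rw [pvTri, pvTriples, List.flatMap_map]
  have hr : (pvRevNested (PySem.Dict.mk (dg.map (fun p => (p.1, PySem.Dict.mk p.2))))).items
      = (pvNs dg).map (fun n => (n, PySem.Dict.mk (pvG dg n))) := by
    rw [pv_rev_items _ (by rw [hTri1]; exact hpair1), hTri1]
    rfl
  have hxs2 : (pvRevNested (PySem.Dict.mk (dg.map (fun p => (p.1, PySem.Dict.mk p.2))))).items.map
        (fun p => (p.1, pvPruneMode p.2))
      = (pvNs dg).map (fun n => (n, PySem.Dict.mk (pvH dg n))) := by
    rw [hr, List.map_map]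
    apply List.map_congr_left
    intro n _
    simp only [Function.comp_apply]
    congr 1
    rw [pv_prune_eq]
    rfl
  have hTri2 : pvTri ((pvNs dg).map (fun n => (n, PySem.Dict.mk (pvH dg n)))) = pvT2 dg := by
    rw [pvTri, pvT2, List.flatMap_map]
  show (pvRevNested (PySem.Dict.mk ((pvRevNested (PySem.Dict.mk (dg.map (fun p => (p.1, PySem.Dict.mk p.2))))).items.map
      (fun p => (p.1, pvPruneMode p.2))))).items.map (fun p => (p.1, p.2.items)) = _
  rw [hxs2, pv_rev_items _ (by rw [hTri2]; exact pvT2_pairs_nodup dg hpair1), hTri2, List.map_map]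
  rfl

-- the inner-dict value seen for outer key fk
def pvInner (dg : List (String × List (String × Int))) (fk : String) : List (String × Int) :=
  (PySem.Dict.mk dg).getD fk []

theorem pv_mem_grp (dg : List (String × List (String × Int))) (n fk : String) (v : Int) :
    (fk, v) ∈ pvG dg n ↔ ∃ l, (fk, l) ∈ dg ∧ (n, v) ∈ l := by
  simp only [pvG, pvGrp, pvTriples, List.mem_map, List.mem_filter, List.mem_flatMap]
  constructor
  · rintro ⟨t, ⟨⟨p, hp, ht⟩, hn⟩, hfv⟩
    obtain ⟨q, hq, rfl⟩ := ht
    refine ⟨p.2, ?_, ?_⟩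
    · have : p.1 = fk := congrArg Prod.fst hfv
      rw [← this]; exact hp
    · have hqn : q.1 = n := by simpa using hn
      have hqv : q.2 = v := congrArg Prod.snd hfv
      rw [← hqn, ← hqv]; exact hq
  · rintro ⟨l, hl, hnv⟩
    refine ⟨(fk, n, v), ⟨⟨(fk, l), hl, ⟨(n, v), hnv, rfl⟩⟩, by simp⟩, rfl⟩

theorem pv_filter_key_unique (l : List (String × Int))
    (hnd : (l.map (fun p => p.1)).Nodup) (fk : String) (v : Int) (h : (fk, v) ∈ l) :
    l.filter (fun q => q.1 == fk) = [(fk, v)] := by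
  induction l with
  | nil => simp at h
  | cons p l ih =>
    simp only [List.map_cons, List.nodup_cons] at hnd
    rcases List.mem_cons.mp h with rfl | h
    · simp only [List.filter_cons, BEq.rfl, if_pos]
      have : l.filter (fun q => q.1 == fk) = [] := by
        rw [List.filter_eq_nil_iff]
        intro q hq hqfk
        exact hnd.1 (List.mem_map.mpr ⟨q, hq, by simpa using hqfk⟩)
      simp [this]
    · have hne : (p.1 == fk) = false := by
        have : p.1 ≠ fk := by
          intro he
          exact hnd.1 (List.mem_map.mpr ⟨(fk, v), h, by simp [he]⟩)
        simpa using this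
      simp only [List.filter_cons, hne]
      exact ih hnd.2 h

-- an intermediate form of B's inner list: one lookup per inner key, in sorted order
def pvJ (dg : List (String × List (String × Int))) (fk : String) : List (String × Int) :=
  (pvNs dg).filterMap (fun n =>
    match (PySem.Dict.mk (pvInner dg fk)).get? n with
    | some v =>
        if (pvDrops (PySem.List.sorted (pvG dg n) (fun x => x.1))).contains fk then none
        else some (n, v)
    | none => none)

theorem pv_keys_mk_dg_nodup (dg : List (String × List (String × Int)))
    (h1 : (dg.map (fun p => p.1)).Nodup) : (PySem.Dict.mk dg).keys.Nodup := by
  rw [PySem.Dict.keys_mk]; exact h1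

theorem pv_inner_nodup (dg : List (String × List (String × Int)))
    (h1 : (dg.map (fun p => p.1)).Nodup)
    (h2 : ∀ p ∈ dg, (p.2.map (fun q => q.1)).Nodup) (fk : String) :
    ((PySem.Dict.mk (pvInner dg fk)).keys).Nodup := by
  rw [PySem.Dict.keys_mk]
  by_cases hc : (PySem.Dict.mk dg).contains fk = true
  · obtain ⟨l, hl⟩ : ∃ l, (fk, l) ∈ dg := by
      have := (PySem.Dict.contains_iff_mem_keys _ _).mp hc
      rw [PySem.Dict.keys_mk] at this
      obtain ⟨p, hp, hfk⟩ := List.mem_map.mp this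
      refine ⟨p.2, ?_⟩
      have hpe : (fk, p.2) = p := by rw [← hfk]
      rw [hpe]; exact hp
    have : pvInner dg fk = l := PySem.Dict.getD_of_mem_items _ hl (pv_keys_mk_dg_nodup dg h1) []
    rw [this]
    exact h2 (fk, l) hl
  · have : pvInner dg fk = [] :=
      PySem.Dict.getD_of_not_contains _ _ (Bool.eq_false_iff.mpr hc)
    simp [this]

theorem pv_inner_mem (dg : List (String × List (String × Int)))
    (h1 : (dg.map (fun p => p.1)).Nodup) (fk n : String) (v : Int) :
    ((n, v) ∈ pvInner dg fk ↔ (fk, v) ∈ pvG dg n) := by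
  rw [pv_mem_grp]
  constructor
  · intro h
    have hne : pvInner dg fk ≠ [] := fun he => by simp [he] at h
    by_cases hc : (PySem.Dict.mk dg).contains fk = true
    · obtain ⟨p, hp, hfk⟩ := List.mem_map.mp (by
        have := (PySem.Dict.contains_iff_mem_keys _ _).mp hc
        rwa [PySem.Dict.keys_mk] at this)
      have hpe : (fk, p.2) = p := by rw [← hfk]
      have hp' : (fk, p.2) ∈ dg := by rw [hpe]; exact hp
      have : pvInner dg fk = p.2 :=
        PySem.Dict.getD_of_mem_items _ hp' (pv_keys_mk_dg_nodup dg h1) []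
      exact ⟨p.2, hp', by rwa [this] at h⟩
    · exact absurd (PySem.Dict.getD_of_not_contains _ _ (Bool.eq_false_iff.mpr hc)) hne
  · rintro ⟨l, hl, hnv⟩
    have : pvInner dg fk = l := PySem.Dict.getD_of_mem_items _ hl (pv_keys_mk_dg_nodup dg h1) []
    rwa [this]

theorem pvJG (dg : List (String × List (String × Int)))
    (h1 : (dg.map (fun p => p.1)).Nodup)
    (h2 : ∀ p ∈ dg, (p.2.map (fun q => q.1)).Nodup) (fk : String) :
    pvJ dg fk = pvG2 dg fk := by
  have hpair1 := pv_triples_pairs_nodup dg h1 h2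
  have hG2 : pvG2 dg fk = (pvNs dg).flatMap
      (fun n => ((pvH dg n).filter (fun q => q.1 == fk)).map (fun q => (n, q.2))) := by
    rw [pvG2, pvGrp, pvT2, List.filter_flatMap, List.map_flatMap]
    apply List.flatMap_congr
    intro n _
    rw [List.filter_map, List.map_map]
    rfl
  rw [hG2, pvJ, List.filterMap_eq_flatMap_toList]
  apply List.flatMap_congr
  intro n hn
  have hknd := pv_inner_nodup dg h1 h2 fk
  cases hg : (PySem.Dict.mk (pvInner dg fk)).get? n with
  | some v =>
    have hmem : (n, v) ∈ pvInner dg fk := by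
      have := (PySem.Dict.get?_eq_some_iff_mem_items _ _ _ hknd).mp hg
      exact this
    have hgrp : (fk, v) ∈ pvG dg n := (pv_inner_mem dg h1 fk n v).mp hmem
    show (if (pvDrops (PySem.List.sorted (pvG dg n) (fun x => x.1))).contains fk
        then none else some (n, v)).toList = _
    by_cases hdrop : fk ∈ pvDrops (PySem.List.sorted (pvG dg n) (fun x => x.1))
    · rw [if_pos (by simpa using hdrop)]
      have hfil : (pvH dg n).filter (fun q => q.1 == fk) = [] := by
        rw [List.filter_eq_nil_iff]
        intro q hq hqfk
        have hq1 : q.1 = fk := by simpa using hqfk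
        have := (List.mem_filter.mp hq).2
        rw [hq1] at this
        simp [hdrop] at this
      simp [hfil]
    · rw [if_neg (by simpa using hdrop)]
      have hmemH : (fk, v) ∈ pvH dg n := by
        rw [pvH, List.mem_filter]
        exact ⟨hgrp, by simpa using hdrop⟩
      rw [pv_filter_key_unique _ ((pvH_fst_nodup dg hpair1 n)) fk v hmemH]
      rfl
  | none =>
    have hfil : (pvH dg n).filter (fun q => q.1 == fk) = [] := by
      rw [List.filter_eq_nil_iff]
      intro q hq hqfk
      have hq1 : q.1 = fk := by simpa using hqfk
      have hqG : q ∈ pvG dg n := List.mem_of_mem_filter hq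
      have : (fk, q.2) ∈ pvG dg n := by rw [← hq1]; exact hqG
      have hmem := (pv_inner_mem dg h1 fk n q.2).mpr this
      have := (PySem.Dict.get?_eq_some_iff_mem_items _ _ _ hknd).mpr hmem
      rw [hg] at this
      cases this
    simp [hfil]

-- the inner association list B builds for outer key fk
def pvI (dg : List (String × List (String × Int))) (fk : String) : List (String × Int) :=
  (PySem.List.sorted (pvInner dg fk) (fun t => t.1)).filter
    (fun q => !((pvDrops (PySem.List.sorted (pvG dg q.1) (fun x => x.1))).contains fk))

theorem pv_mem_N (dg : List (String × List (String × Int))) (n fk : String) (v : Int)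
    (h : (fk, v) ∈ pvG dg n) : n ∈ pvN dg := by
  rw [pvN, PySem.Set.mem_ofList]
  rw [pvG, pvGrp] at h
  obtain ⟨t, ht, _⟩ := List.mem_map.mp h
  have htf := List.mem_filter.mp ht
  exact List.mem_map.mpr ⟨t, htf.1, by simpa using htf.2⟩

theorem pv_items_foldl_insert_filter (l : List (String × Int)) (C : String → Bool)
    (acc : PySem.Dict String Int) (hnd : (l.map (fun q => q.1)).Nodup)
    (hacc : ∀ q ∈ l, acc.contains q.1 = false) :
    (l.foldl (fun acc q => if C q.1 then acc else acc.insert q.1 q.2) acc).items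
    = acc.items ++ l.filter (fun q => !C q.1) := by
  induction l generalizing acc with
  | nil => simp
  | cons q l ih =>
    simp only [List.foldl_cons, List.filter_cons]
    have hnd' := (List.nodup_cons.mp (by simpa using hnd : ((q.1 :: l.map (fun q => q.1)).Nodup))).2
    have hq1 := (List.nodup_cons.mp (by simpa using hnd : ((q.1 :: l.map (fun q => q.1)).Nodup))).1
    cases hC : C q.1 with
    | true =>
      rw [if_pos rfl, if_neg (by simp)]
      exact ih _ hnd' (fun r hr => hacc r (List.mem_cons_of_mem _ hr))
    | false =>
      rw [if_neg (by simp), if_pos (by simp)]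
      rw [ih _ hnd' ?_]
      · rw [PySem.Dict.items_insert_of_not_contains _ _ (hacc q (List.mem_cons_self ..))]
        simp [List.append_assoc]
      · intro r hr
        rw [PySem.Dict.contains_insert]
        have : r.1 ≠ q.1 := fun h => hq1 (h ▸ List.mem_map.mpr ⟨r, hr, rfl⟩)
        simp [this, hacc r (List.mem_cons_of_mem _ hr)]

theorem pv_sorted_inner_fst_nodup (dg : List (String × List (String × Int)))
    (h1 : (dg.map (fun p => p.1)).Nodup)
    (h2 : ∀ p ∈ dg, (p.2.map (fun q => q.1)).Nodup) (fk : String) :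
    ((PySem.List.sorted (pvInner dg fk) (fun t => t.1)).map (fun q => q.1)).Nodup := by
  have hperm := (PySem.List.sorted_perm (pvInner dg fk) (fun t => t.1) false).map (fun q => q.1)
  refine hperm.nodup_iff.mpr ?_
  have := pv_inner_nodup dg h1 h2 fk
  rwa [PySem.Dict.keys_mk] at this

theorem pv_pairwise_lt_of_le_nodup (l : List (String × Int))
    (hle : l.Pairwise (fun a b => a.1 ≤ b.1)) (hnd : (l.map (fun q => q.1)).Nodup) :
    l.Pairwise (fun a b => a.1 < b.1) := by
  have hne : l.Pairwise (fun a b => a.1 ≠ b.1) := List.pairwise_map.mp hnd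
  exact (hle.and hne).imp (fun h => lt_of_le_of_ne h.1 h.2)

theorem pv_strict_eq (l₁ l₂ : List (String × Int))
    (hp₁ : l₁.Pairwise (fun a b => a.1 < b.1)) (hp₂ : l₂.Pairwise (fun a b => a.1 < b.1))
    (hm : ∀ q, q ∈ l₁ ↔ q ∈ l₂) : l₁ = l₂ := by
  have hnd₁ : l₁.Nodup := hp₁.imp (fun h he => absurd (he ▸ h) (lt_irrefl _))
  have hnd₂ : l₂.Nodup := hp₂.imp (fun h he => absurd (he ▸ h) (lt_irrefl _))
  have hperm : l₁.Perm l₂ := (List.perm_ext_iff_of_nodup hnd₁ hnd₂).mpr hm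
  have e₁ : PySem.List.sorted l₂ (fun q => q.1) = l₁ :=
    PySem.List.sorted_eq_of_perm_of_pairwise_lt l₂ l₁ (fun q => q.1) hperm hp₁
  have e₂ : PySem.List.sorted l₂ (fun q => q.1) = l₂ :=
    PySem.List.sorted_eq_of_perm_of_pairwise_lt l₂ l₂ (fun q => q.1) (List.Perm.refl l₂) hp₂
  exact e₁.symm.trans e₂

theorem pvIG (dg : List (String × List (String × Int)))
    (h1 : (dg.map (fun p => p.1)).Nodup)
    (h2 : ∀ p ∈ dg, (p.2.map (fun q => q.1)).Nodup) (fk : String) :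
    pvI dg fk = pvG2 dg fk := by
  have hknd := pv_inner_nodup dg h1 h2 fk
  rw [← pvJG dg h1 h2 fk]
  apply pv_strict_eq
  · exact List.Pairwise.filter _ (pv_pairwise_lt_of_le_nodup _
      (PySem.List.sorted_pairwise (pvInner dg fk) (fun t => t.1))
      (pv_sorted_inner_fst_nodup dg h1 h2 fk))
  · rw [pvJ]
    have hstrict : (pvNs dg).Pairwise (· < ·) := by
      rw [show pvNs dg = PySem.List.sorted
        (PySem.Set.ofList ((pvTriples dg).map (fun t => t.2.1))) (fun x => x) from rfl]
      exact PySem.List.sorted_ofList_pairwise_lt _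
    refine List.pairwise_filterMap.mpr (hstrict.imp fun {n n'} h => ?_)
    · intro b hb b' hb'
      have hfst : ∀ (m : String) (b : String × Int),
          (match (PySem.Dict.mk (pvInner dg fk)).get? m with
            | some v =>
                if (pvDrops (PySem.List.sorted (pvG dg m) (fun x => x.1))).contains fk then none
                else some (m, v)
            | none => none) = some b → b.1 = m := by
        intro m b hbm
        cases hget : (PySem.Dict.mk (pvInner dg fk)).get? m with
        | none => simp only [hget] at hbm; cases hbm
        | some v =>
          simp only [hget] at hbm
          by_cases hc : (pvDrops (PySem.List.sorted (pvG dg m) (fun x => x.1))).contains fk = true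
          · rw [if_pos hc] at hbm; cases hbm
          · rw [if_neg hc] at hbm
            cases hbm
            rfl
      rw [hfst n b hb, hfst n' b' hb']
      exact h
  · intro q
    rw [pvI, List.mem_filter, PySem.List.mem_sorted, pvJ, List.mem_filterMap]
    constructor
    · rintro ⟨hmem, hcond⟩
      have hmem' : (q.1, q.2) ∈ pvInner dg fk := by simpa using hmem
      refine ⟨q.1, ?_, ?_⟩
      · have hG := (pv_inner_mem dg h1 fk q.1 q.2).mp hmem'
        exact (PySem.List.mem_sorted _ _ _ _).mpr (pv_mem_N dg q.1 fk q.2 hG)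
      · have hget : (PySem.Dict.mk (pvInner dg fk)).get? q.1 = some q.2 :=
          (PySem.Dict.get?_eq_some_iff_mem_items _ _ _ hknd).mpr hmem'
        simp only [hget]
        rw [if_neg (by simpa using hcond)]
    · rintro ⟨n, _, hg⟩
      cases hget : (PySem.Dict.mk (pvInner dg fk)).get? n with
      | none => simp only [hget] at hg; cases hg
      | some v =>
        simp only [hget] at hg
        by_cases hc : (pvDrops (PySem.List.sorted (pvG dg n) (fun x => x.1))).contains fk = true
        · rw [if_pos hc] at hg; cases hg
        · rw [if_neg hc] at hg
          cases hg
          refine ⟨(PySem.Dict.get?_eq_some_iff_mem_items _ _ _ hknd).mp hget, ?_⟩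
          simpa using hc

theorem pv_memFKs (dg : List (String × List (String × Int))) (fk : String) :
    fk ∈ pvFKs dg ↔ (pvG2 dg fk ≠ [] ∧ fk ∈ dg.map (fun p => p.1)) := by
  have hex : fk ∈ pvFKs dg ↔ ∃ t ∈ pvT2 dg, t.2.1 = fk := by
    rw [pvFKs]
    rw [PySem.Set.mem_ofList]
    simp [List.mem_map]
  have hne : pvG2 dg fk ≠ [] ↔ ∃ t ∈ pvT2 dg, t.2.1 = fk := by
    rw [pvG2, pvGrp]
    constructor
    · intro h
      rcases hfil : (pvT2 dg).filter (fun t => t.2.1 == fk) with _ | ⟨t, ts⟩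
      · rw [hfil] at h; simp at h
      · have ht : t ∈ (pvT2 dg).filter (fun t => t.2.1 == fk) := by rw [hfil]; exact List.mem_cons_self ..
        exact ⟨t, List.mem_of_mem_filter ht, by simpa using (List.mem_filter.mp ht).2⟩
    · rintro ⟨t, ht, htfk⟩
      intro hmap
      have : t ∈ (pvT2 dg).filter (fun t => t.2.1 == fk) := List.mem_filter.mpr ⟨ht, by simpa using htfk⟩
      rw [List.map_eq_nil_iff.mp hmap] at this
      simp at this
  have hsub : (∃ t ∈ pvT2 dg, t.2.1 = fk) → fk ∈ dg.map (fun p => p.1) := by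
    rintro ⟨t, ht, rfl⟩
    rw [pvT2] at ht
    obtain ⟨n, _, htn⟩ := List.mem_flatMap.mp ht
    obtain ⟨q, hq, rfl⟩ := List.mem_map.mp htn
    have hqG : q ∈ pvG dg n := List.mem_of_mem_filter hq
    have : (q.1, q.2) ∈ pvG dg n := by simpa using hqG
    obtain ⟨l, hl, _⟩ := (pv_mem_grp dg n q.1 q.2).mp this
    exact List.mem_map.mpr ⟨(q.1, l), hl, rfl⟩
  rw [hex, hne]
  exact ⟨fun h => ⟨h, hsub h⟩, fun h => h.1⟩

theorem pv_outer (dg : List (String × List (String × Int)))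
    (h1 : (dg.map (fun p => p.1)).Nodup) :
    PySem.List.sorted (pvFKs dg) (fun x => x)
    = (PySem.List.sorted (dg.map (fun p => p.1)) (fun x => x)).filter
        (fun fk => decide ¬((pvG2 dg fk).length = 0)) := by
  have hsnodup : (PySem.List.sorted (dg.map (fun p => p.1)) (fun x => x)).Nodup :=
    ((PySem.List.sorted_perm (dg.map (fun p => p.1)) (fun x => x) false).nodup_iff).mpr h1
  apply PySem.List.sorted_eq_of_perm_of_pairwise_lt
  · have hFKnodup : (pvFKs dg).Nodup := PySem.Set.nodup_ofList _
    rw [List.perm_ext_iff_of_nodup (hsnodup.filter _) hFKnodup]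
    intro fk
    rw [List.mem_filter, PySem.List.mem_sorted, pv_memFKs]
    constructor
    · rintro ⟨hmem, hdec⟩
      refine ⟨?_, hmem⟩
      intro hnil
      simp [hnil] at hdec
    · rintro ⟨hne, hmem⟩
      refine ⟨hmem, ?_⟩
      simpa using fun h => hne (List.eq_nil_of_length_eq_zero h)
  · refine List.Pairwise.filter _ ?_
    have hle := PySem.List.sorted_pairwise (dg.map (fun p => p.1)) (fun x => x)
    have hne := hsnodup
    exact (hle.and hne).imp (fun h => lt_of_le_of_ne h.1 h.2)

-- ========== new B-side lemmas: the local successor scan ==========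

-- the running-min step B's scan reduces to on the candidate list
def pvMinStep (b : Option (String × Int)) (c : String × Int) : Option (String × Int) :=
  if (match b with | none => true | some x => decide (c.1 < x.1)) then some c else b

-- candidates of (fk, n): outer keys larger than fk that carry n, with their values
def pvCands (dg : List (String × List (String × Int))) (fk n : String) : List (String × Int) :=
  (dg.filter (fun p => decide (fk < p.1) && (PySem.Dict.mk p.2).contains n)).map
    (fun p => (p.1, (PySem.Dict.mk p.2).getD n 0))

theorem pv_best_filter (fk n : String) (l : List (String × List (String × Int)))
    (acc : Option (String × Int)) :
    l.foldl (pvBestStep fk n) acc = (pvCands l fk n).foldl pvMinStep acc := by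
  induction l generalizing acc with
  | nil => rfl
  | cons p l ih =>
    simp only [List.foldl_cons, pvCands, List.filter_cons]
    cases hq : (decide (fk < p.1) && (PySem.Dict.mk p.2).contains n) with
    | false =>
      rw [if_neg (by simp)]
      have : pvBestStep fk n acc p = acc := by
        unfold pvBestStep
        rw [hq, Bool.false_and]
        rfl
      rw [this, ih]
      rfl
    | true =>
      rw [if_pos rfl]
      have : pvBestStep fk n acc p = pvMinStep acc (p.1, (PySem.Dict.mk p.2).getD n 0) := by
        unfold pvBestStep pvMinStep
        rw [hq, Bool.true_and]
      rw [this, ih]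
      rfl

theorem pv_minfold_isSome (cs : List (String × Int)) (b : String × Int) :
    ∃ r, cs.foldl pvMinStep (some b) = some r := by
  induction cs generalizing b with
  | nil => exact ⟨b, rfl⟩
  | cons c cs ih =>
    simp only [List.foldl_cons, pvMinStep]
    by_cases hlt : c.1 < b.1
    · rw [if_pos (by simpa using hlt)]; exact ih c
    · rw [if_neg (by simpa using hlt)]; exact ih b

theorem pv_minfold_inv (cs : List (String × Int)) (acc : Option (String × Int))
    (r : String × Int) (h : cs.foldl pvMinStep acc = some r) :
    (r ∈ cs ∨ acc = some r) ∧ (∀ c ∈ cs, r.1 ≤ c.1) ∧ (∀ b, acc = some b → r.1 ≤ b.1) := by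
  induction cs generalizing acc with
  | nil =>
    have hacc : acc = some r := h
    exact ⟨Or.inr hacc, by simp, fun b hb => by rw [hacc] at hb; cases hb; exact le_refl _⟩
  | cons c cs ih =>
    simp only [List.foldl_cons] at h
    obtain ⟨hmem, hmin, hacc⟩ := ih (pvMinStep acc c) h
    have hstep : pvMinStep acc c = some c
        ∨ ∃ b, acc = some b ∧ pvMinStep acc c = some b ∧ b.1 ≤ c.1 := by
      cases acc with
      | none => exact Or.inl rfl
      | some b =>
        by_cases hlt : c.1 < b.1
        · exact Or.inl (by simp [pvMinStep, hlt])
        · exact Or.inr ⟨b, rfl, by simp [pvMinStep, hlt], le_of_not_gt hlt⟩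
    have hrc : r.1 ≤ c.1 := by
      rcases hstep with hs | ⟨b, _, hs, hbc⟩
      · exact hacc c hs
      · exact (hacc b hs).trans hbc
    refine ⟨?_, ?_, ?_⟩
    · rcases hmem with hm | hm
      · exact Or.inl (List.mem_cons_of_mem _ hm)
      · rcases hstep with hs | ⟨b, hb, hs, _⟩
        · have hcr : c = r := Option.some.inj (hs.symm.trans hm)
          rw [← hcr]
          exact Or.inl (List.mem_cons_self ..)
        · have hbr : b = r := Option.some.inj (hs.symm.trans hm)
          exact Or.inr (by rw [hb, hbr])
    · intro u hu
      rcases List.mem_cons.mp hu with rfl | hu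
      · exact hrc
      · exact hmin u hu
    · intro b hb
      rcases hstep with hs | ⟨b', hb', hs, _⟩
      · subst hb
        by_cases hlt : c.1 < b.1
        · exact hrc.trans (le_of_lt hlt)
        · have he : pvMinStep (some b) c = some b := by simp [pvMinStep, hlt]
          have hcb : c = b := Option.some.inj ((he.symm.trans hs).symm)
          rw [← hcb]
          exact hrc
      · have hbb : b' = b := Option.some.inj (hb'.symm.trans hb)
        exact hbb ▸ hacc b' hs

theorem pv_eq_of_fst_eq (l : List (String × Int))
    (hnd : (l.map (fun p => p.1)).Nodup) (r w : String × Int)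
    (hr : r ∈ l) (hw : w ∈ l) (h : r.1 = w.1) : r = w :=
  List.inj_on_of_nodup_map hnd hr hw h

theorem pv_mem_cands (dg : List (String × List (String × Int)))
    (h2 : ∀ p ∈ dg, (p.2.map (fun q => q.1)).Nodup)
    (fk n : String) (c : String × Int) :
    c ∈ pvCands dg fk n ↔ c ∈ pvG dg n ∧ fk < c.1 := by
  rw [pvCands, List.mem_map]
  constructor
  · rintro ⟨p, hp, rfl⟩
    have hpf := List.mem_filter.mp hp
    have hlt : fk < p.1 := by
      have := hpf.2; simp only [Bool.and_eq_true, decide_eq_true_eq] at this; exact this.1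
    have hcn : (PySem.Dict.mk p.2).contains n = true := by
      have := hpf.2; simp only [Bool.and_eq_true] at this; exact this.2
    obtain ⟨q, hq, hqn⟩ : ∃ q ∈ p.2, q.1 = n := by
      have := (PySem.Dict.contains_iff_mem_keys _ _).mp hcn
      rw [PySem.Dict.keys_mk] at this
      obtain ⟨q, hq, hqn⟩ := List.mem_map.mp this
      exact ⟨q, hq, hqn⟩
    have hget : (PySem.Dict.mk p.2).getD n 0 = q.2 := by
      have hknd : (PySem.Dict.mk p.2).keys.Nodup := by
        rw [PySem.Dict.keys_mk]; exact h2 p hpf.1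
      have hm : (n, q.2) ∈ p.2 := by rw [← hqn]; exact hq
      exact PySem.Dict.getD_of_mem_items _ hm hknd 0
    refine ⟨?_, hlt⟩
    rw [hget, pv_mem_grp]
    exact ⟨p.2, by rcases p with ⟨a, l⟩; exact hpf.1, by rw [← hqn]; exact hq⟩
  · rintro ⟨hG, hlt⟩
    obtain ⟨l, hl, hnv⟩ := (pv_mem_grp dg n c.1 c.2).mp (by rcases c with ⟨a, b⟩; exact hG)
    refine ⟨(c.1, l), List.mem_filter.mpr ⟨hl, ?_⟩, ?_⟩
    · simp only [Bool.and_eq_true, decide_eq_true_eq]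
      refine ⟨hlt, (PySem.Dict.contains_iff_mem_keys _ _).mpr ?_⟩
      rw [PySem.Dict.keys_mk]
      exact List.mem_map.mpr ⟨(n, c.2), hnv, rfl⟩
    · have hknd : (PySem.Dict.mk l).keys.Nodup := by
        rw [PySem.Dict.keys_mk]; exact h2 (c.1, l) hl
      have := PySem.Dict.getD_of_mem_items (PySem.Dict.mk l) hnv hknd 0
      rw [this]

-- adjacency in a strictly key-sorted list = closest larger key
theorem pv_drops_iff (sp : List (String × Int))
    (hp : sp.Pairwise (fun a b => a.1 < b.1)) (fk : String) (v : Int)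
    (hmem : (fk, v) ∈ sp) :
    fk ∈ pvDrops sp
    ↔ ∃ w ∈ sp, fk < w.1 ∧ (∀ u ∈ sp, fk < u.1 → w.1 ≤ u.1) ∧ w.2 < v := by
  induction sp with
  | nil => simp at hmem
  | cons a rest ih =>
    have hpa := (List.pairwise_cons.mp hp).1
    have hpr := (List.pairwise_cons.mp hp).2
    have hdropsub : ∀ x ∈ pvDrops rest, ∃ u ∈ rest, u.1 = x := by
      intro x hx
      rw [pvDrops, List.mem_map] at hx
      obtain ⟨pr, hpr', rfl⟩ := hx
      exact ⟨pr.1, (List.of_mem_zip (List.mem_of_mem_filter hpr')).1, rfl⟩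
    rcases List.mem_cons.mp hmem with heq | hmemr
    · -- (fk, v) = a
      have hfk : fk = a.1 := congrArg Prod.fst heq
      have hv : v = a.2 := congrArg Prod.snd heq
      cases rest with
      | nil =>
        constructor
        · intro h; simp [pvDrops] at h
        · rintro ⟨w, hw, hlt, _⟩
          rcases List.mem_cons.mp hw with rfl | hw
          · exact absurd hlt (by rw [hfk]; exact lt_irrefl _)
          · simp at hw
      | cons b rest' =>
        have hdropseq : pvDrops (a :: b :: rest')
            = (if b.2 < a.2 then [a.1] else []) ++ pvDrops (b :: rest') := by
          simp only [pvDrops, List.zip_cons_cons, List.tail_cons, List.filter_cons]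
          by_cases hba : b.2 < a.2
          · rw [if_pos (by simpa using hba), if_pos hba]; rfl
          · rw [if_neg (by simpa using hba), if_neg hba]; rfl
        have hnotrest : fk ∉ pvDrops (b :: rest') := by
          intro hx
          obtain ⟨u, hu, hufk⟩ := hdropsub fk hx
          have : a.1 < u.1 := hpa u hu
          rw [hufk, ← hfk] at this
          exact absurd this (lt_irrefl fk)
        constructor
        · intro h
          rw [hdropseq] at h
          have hba : b.2 < a.2 := by
            by_contra hba
            rw [if_neg hba] at h
            exact hnotrest (by simpa using h)
          refine ⟨b, List.mem_cons_of_mem _ (List.mem_cons_self ..), ?_, ?_, by rw [hv]; exact hba⟩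
          · rw [hfk]; exact hpa b (List.mem_cons_self ..)
          · intro u hu hltu
            rcases List.mem_cons.mp hu with rfl | hu
            · exact absurd hltu (by rw [hfk]; exact lt_irrefl _)
            · rcases List.mem_cons.mp hu with rfl | hu
              · exact le_refl _
              · exact le_of_lt ((List.pairwise_cons.mp hpr).1 u hu)
        · rintro ⟨w, hw, hltw, hmin, hwv⟩
          have hwb : w = b := by
            rcases List.mem_cons.mp hw with rfl | hw'
            · exact absurd hltw (by rw [hfk]; exact lt_irrefl _)
            · rcases List.mem_cons.mp hw' with rfl | hw''
              · rfl
              · have h1' : w.1 ≤ b.1 := hmin b (List.mem_cons_of_mem _ (List.mem_cons_self ..))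
                  (by rw [hfk]; exact hpa b (List.mem_cons_self ..))
                have h2' : b.1 < w.1 := (List.pairwise_cons.mp hpr).1 w hw''
                exact absurd h1' (not_le_of_gt h2')
          rw [hdropseq]
          have : b.2 < a.2 := by rw [← hwb, ← hv]; exact hwv
          rw [if_pos this]
          rw [hfk]
          exact List.mem_append.mpr (Or.inl (List.mem_cons_self ..))
    · -- (fk, v) ∈ rest
      have haf : a.1 < fk := hpa (fk, v) hmemr
      cases rest with
      | nil => simp at hmemr
      | cons b rest' =>
        have hdropseq : pvDrops (a :: b :: rest')
            = (if b.2 < a.2 then [a.1] else []) ++ pvDrops (b :: rest') := by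
          simp only [pvDrops, List.zip_cons_cons, List.tail_cons, List.filter_cons]
          by_cases hba : b.2 < a.2
          · rw [if_pos (by simpa using hba), if_pos hba]; rfl
          · rw [if_neg (by simpa using hba), if_neg hba]; rfl
        have hih := ih hpr hmemr
        constructor
        · intro h
          rw [hdropseq, List.mem_append] at h
          have hfr : fk ∈ pvDrops (b :: rest') := by
            rcases h with h | h
            · by_cases hba : b.2 < a.2
              · rw [if_pos hba] at h
                have : fk = a.1 := by simpa using h
                exact absurd this (by intro he; rw [he] at haf; exact lt_irrefl _ haf)
              · rw [if_neg hba] at h; simp at h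
            · exact h
          obtain ⟨w, hw, hltw, hmin, hwv⟩ := hih.mp hfr
          refine ⟨w, List.mem_cons_of_mem _ hw, hltw, ?_, hwv⟩
          intro u hu hltu
          rcases List.mem_cons.mp hu with rfl | hu
          · exact absurd hltu (not_lt_of_gt haf)
          · exact hmin u hu hltu
        · rintro ⟨w, hw, hltw, hmin, hwv⟩
          have hwr : w ∈ b :: rest' := by
            rcases List.mem_cons.mp hw with rfl | hw'
            · exact absurd hltw (not_lt_of_gt haf)
            · exact hw'
          have : fk ∈ pvDrops (b :: rest') := by
            refine hih.mpr ⟨w, hwr, hltw, ?_, hwv⟩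
            intro u hu hltu
            exact hmin u (List.mem_cons_of_mem _ hu) hltu
          rw [hdropseq, List.mem_append]
          exact Or.inr this

theorem pv_sorted_grp_pairwise (dg : List (String × List (String × Int)))
    (hpair : ((pvTriples dg).map (fun t => (t.1, t.2.1))).Nodup) (n : String) :
    (PySem.List.sorted (pvG dg n) (fun x => x.1)).Pairwise (fun a b => a.1 < b.1) := by
  apply pv_pairwise_lt_of_le_nodup
  · exact PySem.List.sorted_pairwise (pvG dg n) (fun x => x.1)
  · have hperm := (PySem.List.sorted_perm (pvG dg n) (fun x => x.1) false).map (fun q => q.1)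
    exact hperm.nodup_iff.mpr (pv_grp_fst_nodup _ hpair n)

-- the central equivalence: B's local successor test decides exactly A's "dropped" set
theorem pv_cond_iff (dg : List (String × List (String × Int)))
    (h1 : (dg.map (fun p => p.1)).Nodup)
    (h2 : ∀ p ∈ dg, (p.2.map (fun q => q.1)).Nodup)
    (fk n : String) (v : Int) (hG : (fk, v) ∈ pvG dg n) :
    ((pvDrops (PySem.List.sorted (pvG dg n) (fun x => x.1))).contains fk = true)
    ↔ ∃ b, dg.foldl (pvBestStep fk n) none = some b ∧ b.2 < v := by
  have hpair := pv_triples_pairs_nodup dg h1 h2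
  set sp := PySem.List.sorted (pvG dg n) (fun x => x.1) with hsp
  have hp : sp.Pairwise (fun a b => a.1 < b.1) := pv_sorted_grp_pairwise dg hpair n
  have hmemsp : (fk, v) ∈ sp := (PySem.List.mem_sorted _ _ _ _).mpr hG
  have hGnd := pv_grp_fst_nodup (pvTriples dg) hpair n
  have hspG : ∀ u : String × Int, u ∈ sp ↔ u ∈ pvG dg n := fun u =>
    PySem.List.mem_sorted _ _ _ u
  rw [List.contains_iff_mem, pv_drops_iff sp hp fk v hmemsp, pv_best_filter]
  constructor
  · rintro ⟨w, hw, hltw, hmin, hwv⟩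
    have hwc : w ∈ pvCands dg fk n :=
      (pv_mem_cands dg h2 fk n w).mpr ⟨(hspG w).mp hw, hltw⟩
    obtain ⟨r, hr⟩ : ∃ r, (pvCands dg fk n).foldl pvMinStep none = some r := by
      cases hcs : pvCands dg fk n with
      | nil => rw [hcs] at hwc; simp at hwc
      | cons c cs =>
        have : pvMinStep none c = some c := rfl
        rw [List.foldl_cons, this]
        exact pv_minfold_isSome cs c
    obtain ⟨hrmem, hrmin, _⟩ := pv_minfold_inv _ _ _ hr
    have hrc : r ∈ pvCands dg fk n := by
      rcases hrmem with h | h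
      · exact h
      · cases h
    have hrG := (pv_mem_cands dg h2 fk n r).mp hrc
    have hle1 : r.1 ≤ w.1 := hrmin w hwc
    have hle2 : w.1 ≤ r.1 := hmin r ((hspG r).mpr hrG.1) hrG.2
    have hrw : r = w := pv_eq_of_fst_eq (pvG dg n) hGnd r w hrG.1 ((hspG w).mp hw)
      (le_antisymm hle1 hle2)
    exact ⟨r, hr, by rw [hrw]; exact hwv⟩
  · rintro ⟨b, hb, hbv⟩
    obtain ⟨hbmem, hbmin, _⟩ := pv_minfold_inv _ _ _ hb
    have hbc : b ∈ pvCands dg fk n := by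
      rcases hbmem with h | h
      · exact h
      · cases h
    have hbG := (pv_mem_cands dg h2 fk n b).mp hbc
    refine ⟨b, (hspG b).mpr hbG.1, hbG.2, ?_, hbv⟩
    intro u hu hltu
    exact hbmin u ((pv_mem_cands dg h2 fk n u).mpr ⟨(hspG u).mp hu, hltu⟩)

-- the inner dict B builds for outer key fk (named copy of the alt body's inner let)
def pvInnerFold2 (dg : List (String × List (String × Int))) (fk : String) :
    PySem.Dict String Int :=
  (PySem.List.sorted (PySem.Dict.mk ((PySem.Dict.mk dg).getD fk [])).keys (fun x => x)).foldl
    (fun acc n =>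
      let v := (PySem.Dict.mk ((PySem.Dict.mk dg).getD fk [])).getD n 0
      match dg.foldl (pvBestStep fk n) none with
      | none => acc.insert n v
      | some b => if v ≤ b.2 then acc.insert n v else acc)
    (PySem.Dict.empty : PySem.Dict String Int)

-- sorted keys with lookups = sorted items, for a nodup-key dict
theorem pv_sorted_keys_map (dg : List (String × List (String × Int)))
    (h1 : (dg.map (fun p => p.1)).Nodup)
    (h2 : ∀ p ∈ dg, (p.2.map (fun q => q.1)).Nodup) (fk : String) :
    PySem.List.sorted (PySem.Dict.mk (pvInner dg fk)).keys (fun x => x)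
    = (PySem.List.sorted (pvInner dg fk) (fun t => t.1)).map (fun q => q.1) := by
  have hnd := pv_sorted_inner_fst_nodup dg h1 h2 fk
  apply PySem.List.sorted_eq_of_perm_of_pairwise_lt
  · exact (PySem.List.sorted_perm (pvInner dg fk) (fun t => t.1) false).map _
  · have := pv_pairwise_lt_of_le_nodup _
      (PySem.List.sorted_pairwise (pvInner dg fk) (fun t => t.1)) hnd
    rw [List.pairwise_map]
    exact this

theorem pvB_char (dg : List (String × List (String × Int)))
    (h1 : (dg.map (fun p => p.1)).Nodup)
    (h2 : ∀ p ∈ dg, (p.2.map (fun q => q.1)).Nodup) :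
    remove_wrong_slope_alt dg
    = ((PySem.List.sorted (dg.map (fun p => p.1)) (fun x => x)).filter
        (fun fk => decide ¬((pvI dg fk).length = 0))).map (fun fk => (fk, pvI dg fk)) := by
  have hinner : ∀ fk, (pvInnerFold2 dg fk).items = pvI dg fk := by
    intro fk
    have hknd := pv_sorted_inner_fst_nodup dg h1 h2 fk
    rw [pvInnerFold2]
    rw [show (PySem.Dict.mk dg).getD fk [] = pvInner dg fk from rfl]
    rw [pv_sorted_keys_map dg h1 h2 fk, List.foldl_map]
    have hcong := PySem.List.foldl_congr_mem
      (PySem.List.sorted (pvInner dg fk) (fun t => t.1))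
      (fun (acc : PySem.Dict String Int) (q : String × Int) =>
        let v := (PySem.Dict.mk (pvInner dg fk)).getD q.1 0
        match dg.foldl (pvBestStep fk q.1) none with
        | none => acc.insert q.1 v
        | some b => if v ≤ b.2 then acc.insert q.1 v else acc)
      (fun (acc : PySem.Dict String Int) (q : String × Int) =>
        if (pvDrops (PySem.List.sorted (pvG dg q.1) (fun x => x.1))).contains fk
        then acc else acc.insert q.1 q.2)
      PySem.Dict.empty ?_
    · rw [hcong, pv_items_foldl_insert_filter _
        (fun k => (pvDrops (PySem.List.sorted (pvG dg k) (fun x => x.1))).contains fk)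
        _ hknd (fun q _ => PySem.Dict.contains_empty q.1),
        show PySem.Dict.empty.items = ([] : List (String × Int)) from rfl, List.nil_append]
      rfl
    · intro acc q hq
      have hmem : (q.1, q.2) ∈ pvInner dg fk := by
        simpa using (PySem.List.mem_sorted _ _ _ q).mp hq
      have hv : (PySem.Dict.mk (pvInner dg fk)).getD q.1 0 = q.2 := by
        have hknd' : (PySem.Dict.mk (pvInner dg fk)).keys.Nodup :=
          pv_inner_nodup dg h1 h2 fk
        exact PySem.Dict.getD_of_mem_items _ hmem hknd' 0
      have hG : (fk, q.2) ∈ pvG dg q.1 := (pv_inner_mem dg h1 fk q.1 q.2).mp hmem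
      have hiff := pv_cond_iff dg h1 h2 fk q.1 q.2 hG
      simp only [hv]
      cases hbest : dg.foldl (pvBestStep fk q.1) none with
      | none =>
        have hcf : (pvDrops (PySem.List.sorted (pvG dg q.1) (fun x => x.1))).contains fk = false := by
          rw [← Bool.not_eq_true]
          intro hc
          obtain ⟨b, hb, _⟩ := hiff.mp hc
          rw [hbest] at hb
          cases hb
        show acc.insert q.1 q.2 = _
        rw [if_neg (by rw [hcf]; exact Bool.false_ne_true)]
      | some b =>
        show (if q.2 ≤ b.2 then acc.insert q.1 q.2 else acc) = _
        by_cases hle : q.2 ≤ b.2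
        · rw [if_pos hle]
          have hcf : (pvDrops (PySem.List.sorted (pvG dg q.1) (fun x => x.1))).contains fk = false := by
            rw [← Bool.not_eq_true]
            intro hc
            obtain ⟨b', hb', hbv'⟩ := hiff.mp hc
            rw [hbest] at hb'
            cases hb'
            exact absurd hle (not_le_of_gt hbv')
          rw [if_neg (by rw [hcf]; exact Bool.false_ne_true)]
        · rw [if_neg hle]
          have hct : (pvDrops (PySem.List.sorted (pvG dg q.1) (fun x => x.1))).contains fk = true :=
            hiff.mpr ⟨b, hbest, lt_of_not_ge hle⟩
          rw [if_pos hct]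
  have hfun2 : (fun (res : List (String × List (String × Int))) (fk : String) =>
      if (pvInnerFold2 dg fk).size ≠ 0 then res ++ [(fk, (pvInnerFold2 dg fk).items)] else res)
    = (fun res fk => if ¬(pvI dg fk).length = 0 then res ++ [(fk, pvI dg fk)] else res) := by
    funext res fk
    rw [show (pvInnerFold2 dg fk).size = (pvInnerFold2 dg fk).items.length from rfl,
        hinner fk]
  show (PySem.List.sorted (PySem.Dict.mk dg).keys (fun x => x)).foldl
      (fun res fk =>
        if (pvInnerFold2 dg fk).size ≠ 0 then res ++ [(fk, (pvInnerFold2 dg fk).items)] else res)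
      [] = _
  rw [hfun2, PySem.List.foldl_append_ite (p := fun fk => ¬(pvI dg fk).length = 0)
      (f := fun fk => (fk, pvI dg fk)), List.nil_append,
    show (PySem.Dict.mk dg).keys = dg.map (fun p => p.1) from rfl]

-- ===== VERDICT (by name: the statement is the Claim_ definition above) =====
theorem remove_wrong_slope_spec : Claim_equal_remove_wrong_slope := by
  intro dg _ hPre
  obtain ⟨h1, h2⟩ := hPre
  show remove_wrong_slope dg = remove_wrong_slope_alt dg
  rw [pvA_char dg h1 h2, pvB_char dg h1 h2]
  have hfun : (fun fk => (fk, pvI dg fk)) = (fun fk => (fk, pvG2 dg fk)) :=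
    funext fun fk => by rw [pvIG dg h1 h2 fk]
  have hpred : (fun fk => decide ¬((pvI dg fk).length = 0))
      = (fun fk => decide ¬((pvG2 dg fk).length = 0)) :=
    funext fun fk => by rw [pvIG dg h1 h2 fk]
  rw [hfun, hpred, ← pv_outer dg h1]
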